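-- pv_equiv track=rewrite | github.com/iitb-research-code/complete-ocr | src/table_cellwise_detection.py | get_final_cell
-- ===== SOURCE A (Python) =====
-- def get_merged_cell(final_cells):
--     if len(final_cells) == 1:
--         return final_cells[0]
--     x1 = [c[0] for c in final_cells]
--     y1 = [c[1] for c in final_cells]
--     x2 = [c[2] for c in final_cells]
--     y2 = [c[3] for c in final_cells]
--     cell = [min(x1), min(y1), max(x2), max(y2)]
--     return cell
--
-- def get_final_cell(tablecellrows, skeleton, rowindex, colindex):
--     final_cells = []
--     row_to_consider = tablecellrows[rowindex]
--     col_skeleton = skeleton[rowindex]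
--     assert len(row_to_consider) == len(col_skeleton)
--     for i in range(len(col_skeleton)):
--         if col_skeleton[i] == colindex:
--             final_cells.append(row_to_consider[i])
--     if len(final_cells) == 0:
--         return []
--     else:
--         final_cell = get_merged_cell(final_cells)
--     return final_cell
-- ===== SOURCE B (Python) =====
-- def get_final_cell(tablecellrows, skeleton, rowindex, colindex):
--     # Single fused pass: count matches, remember the first matched cell,
--     # and maintain running min/max of the coordinates (initialised lazily
--     # at the second match, so a lone matched cell is returned unchanged).
--     row_to_consider = tablecellrows[rowindex]
--     col_skeleton = skeleton[rowindex]
--     assert len(row_to_consider) == len(col_skeleton)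
--     count = 0
--     first = None
--     b1 = b2 = b3 = b4 = 0
--     for cell, s in zip(row_to_consider, col_skeleton):
--         if s == colindex:
--             if count == 0:
--                 first = cell
--             else:
--                 if count == 1:
--                     b1, b2, b3, b4 = first[0], first[1], first[2], first[3]
--                 b1 = min(b1, cell[0])
--                 b2 = min(b2, cell[1])
--                 b3 = max(b3, cell[2])
--                 b4 = max(b4, cell[3])
--             count += 1
--     if count == 0:
--         return []
--     if count == 1:
--         return first
--     return [b1, b2, b3, b4]
-- ===== Notes on version B (the rewrite author's own statement) =====
-- stated objective: alternative
-- what changed: Replaces A's build-a-list-of-matching-cells plus four coordinate comprehensions with min()/max() by one fused zip pass that counts matches, captures the first matched cell, and maintains running min/max accumulators.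
import Mathlib
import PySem

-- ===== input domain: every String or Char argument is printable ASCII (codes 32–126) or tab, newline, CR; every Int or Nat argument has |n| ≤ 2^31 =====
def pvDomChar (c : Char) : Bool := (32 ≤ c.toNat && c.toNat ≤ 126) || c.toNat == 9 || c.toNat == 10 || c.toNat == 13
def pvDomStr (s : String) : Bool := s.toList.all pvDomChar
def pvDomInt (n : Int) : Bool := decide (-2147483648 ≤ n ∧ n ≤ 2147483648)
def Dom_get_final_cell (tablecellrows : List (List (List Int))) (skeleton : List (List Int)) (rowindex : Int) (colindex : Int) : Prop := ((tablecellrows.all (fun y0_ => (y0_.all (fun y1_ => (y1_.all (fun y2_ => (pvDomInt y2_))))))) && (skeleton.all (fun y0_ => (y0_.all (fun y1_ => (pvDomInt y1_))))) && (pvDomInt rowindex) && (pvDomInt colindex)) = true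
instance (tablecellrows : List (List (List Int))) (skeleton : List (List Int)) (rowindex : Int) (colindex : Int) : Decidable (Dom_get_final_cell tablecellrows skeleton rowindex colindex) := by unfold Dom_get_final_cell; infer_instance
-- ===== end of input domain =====

-- B fuses A's matched-cell list building and four min/max coordinate passes into one fold over the zipped row (alternative decomposition, same O(n)).

-- ===== PORT A =====
def get_merged_cell (final_cells : List (List Int)) : List Int :=
  if final_cells.length = 1 then PySem.List.pyGetD final_cells 0 []
  else
    let x1 := final_cells.map (fun c => PySem.List.pyGetD c 0 0)
    let y1 := final_cells.map (fun c => PySem.List.pyGetD c 1 0)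
    let x2 := final_cells.map (fun c => PySem.List.pyGetD c 2 0)
    let y2 := final_cells.map (fun c => PySem.List.pyGetD c 3 0)
    [(PySem.List.min? x1 (fun v => v)).getD 0, (PySem.List.min? y1 (fun v => v)).getD 0,
     (PySem.List.max? x2 (fun v => v)).getD 0, (PySem.List.max? y2 (fun v => v)).getD 0]

def get_final_cell (tablecellrows : List (List (List Int))) (skeleton : List (List Int)) (rowindex : Int) (colindex : Int) : List Int :=
  let row_to_consider := PySem.List.pyGetD tablecellrows rowindex []
  let col_skeleton := PySem.List.pyGetD skeleton rowindex []
  -- 'assert len(row_to_consider) == len(col_skeleton)' and the IndexErrors are excluded by Pre_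
  let final_cells := (PySem.List.pyRange 0 (col_skeleton.length : Int) 1).foldl
    (fun acc i => if PySem.List.pyGetD col_skeleton i 0 == colindex
      then acc ++ [PySem.List.pyGetD row_to_consider i []] else acc) []
  if final_cells.length = 0 then [] else get_merged_cell final_cells

-- ===== PORT B =====
-- body of the 'if s == colindex' branch of B's loop (count, first, b1, b2, b3, b4)
def altApply (st : Int × List Int × Int × Int × Int × Int) (cell : List Int) :
    Int × List Int × Int × Int × Int × Int :=
  match st with
  | (count, first, b1, b2, b3, b4) =>
    if count == 0 then (count + 1, cell, b1, b2, b3, b4)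
    else
      let q := if count == 1 then
          (PySem.List.pyGetD first 0 0, PySem.List.pyGetD first 1 0,
           PySem.List.pyGetD first 2 0, PySem.List.pyGetD first 3 0)
        else (b1, b2, b3, b4)
      (count + 1, first,
       min q.1 (PySem.List.pyGetD cell 0 0), min q.2.1 (PySem.List.pyGetD cell 1 0),
       max q.2.2.1 (PySem.List.pyGetD cell 2 0), max q.2.2.2 (PySem.List.pyGetD cell 3 0))

def altStep (colindex : Int) (st : Int × List Int × Int × Int × Int × Int) (p : List Int × Int) :
    Int × List Int × Int × Int × Int × Int :=
  if p.2 == colindex then altApply st p.1 else st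

def get_final_cell_alt (tablecellrows : List (List (List Int))) (skeleton : List (List Int)) (rowindex : Int) (colindex : Int) : List Int :=
  let row_to_consider := PySem.List.pyGetD tablecellrows rowindex []
  let col_skeleton := PySem.List.pyGetD skeleton rowindex []
  let st := (row_to_consider.zip col_skeleton).foldl (altStep colindex) (0, [], 0, 0, 0, 0)
  match st with
  | (count, first, b1, b2, b3, b4) =>
    if count == 0 then [] else if count == 1 then first else [b1, b2, b3, b4]

-- ===== PRECONDITION & SPEC =====
-- the cells of the selected row whose skeleton entry equals colindex
def pvMatched (row : List (List Int)) (col : List Int) (ci : Int) : List (List Int) :=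
  ((row.zip col).filter (fun p => p.2 == ci)).map Prod.fst

-- Pre_ excludes exactly the inputs where the Python A raises: rowindex out of range (IndexError),
-- unequal row/skeleton lengths (AssertionError), and ≥ 2 matched cells with some matched cell
-- shorter than 4 entries (IndexError in the coordinate comprehensions).
def Pre_get_final_cell (tablecellrows : List (List (List Int))) (skeleton : List (List Int)) (rowindex : Int) (colindex : Int) : Prop :=
  PySem.Raise.InRange tablecellrows.length rowindex ∧
  PySem.Raise.InRange skeleton.length rowindex ∧
  (PySem.List.pyGetD tablecellrows rowindex []).length = (PySem.List.pyGetD skeleton rowindex []).length ∧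
  ((pvMatched (PySem.List.pyGetD tablecellrows rowindex []) (PySem.List.pyGetD skeleton rowindex []) colindex).length ≤ 1 ∨
   ∀ c ∈ pvMatched (PySem.List.pyGetD tablecellrows rowindex []) (PySem.List.pyGetD skeleton rowindex []) colindex, 4 ≤ c.length)
instance (tablecellrows : List (List (List Int))) (skeleton : List (List Int)) (rowindex : Int) (colindex : Int) : Decidable (Pre_get_final_cell tablecellrows skeleton rowindex colindex) := by unfold Pre_get_final_cell; infer_instance

def pvWitness_get_final_cell : List (List (List Int)) × List (List Int) × Int × Int :=
  ([[[0, 0, 5, 5], [1, 1, 6, 6]]], [[0, 0]], 0, 0)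

def Spec_get_final_cell (tablecellrows : List (List (List Int))) (skeleton : List (List Int)) (rowindex : Int) (colindex : Int) (out : List Int) : Prop := out = get_final_cell_alt tablecellrows skeleton rowindex colindex
instance (tablecellrows : List (List (List Int))) (skeleton : List (List Int)) (rowindex : Int) (colindex : Int) (out : List Int) : Decidable (Spec_get_final_cell tablecellrows skeleton rowindex colindex out) := by unfold Spec_get_final_cell; infer_instance

-- ===== CLAIM (what is proved, stated in full; the proofs are below) =====
def Claim_equal_get_final_cell : Prop := ∀ (tablecellrows : List (List (List Int))) (skeleton : List (List Int)) (rowindex : Int) (colindex : Int), Dom_get_final_cell tablecellrows skeleton rowindex colindex → Pre_get_final_cell tablecellrows skeleton rowindex colindex → Spec_get_final_cell tablecellrows skeleton rowindex colindex (get_final_cell tablecellrows skeleton rowindex colindex)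

-- ===== LEMMAS AND PROOFS =====

-- the pure fold once count ≥ 2: count keeps counting, the four accumulators fold independently
theorem foldl_altApply_ge_two (rest : List (List Int)) :
    ∀ (k b1 b2 b3 b4 : Int) (first : List Int), 2 ≤ k →
    rest.foldl altApply (k, first, b1, b2, b3, b4) =
      (k + rest.length, first,
       rest.foldl (fun a c => min a (PySem.List.pyGetD c 0 0)) b1,
       rest.foldl (fun a c => min a (PySem.List.pyGetD c 1 0)) b2,
       rest.foldl (fun a c => max a (PySem.List.pyGetD c 2 0)) b3,
       rest.foldl (fun a c => max a (PySem.List.pyGetD c 3 0)) b4) := by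
  induction rest with
  | nil => intro k b1 b2 b3 b4 first hk; simp
  | cons c rest ih =>
    intro k b1 b2 b3 b4 first hk
    have h0 : (k == 0) = false := by simp; omega
    have h1 : (k == 1) = false := by simp; omega
    simp only [List.foldl_cons, altApply, h0, h1, if_false, Bool.false_eq_true]
    rw [ih (k + 1) _ _ _ _ first (by omega)]
    simp; omega

-- B's zip fold is the pure fold over the matched-cells list
theorem foldB_eq_foldl_matched (row : List (List Int)) (col : List Int) (ci : Int) :
    (row.zip col).foldl (altStep ci) (0, [], 0, 0, 0, 0) =
      (pvMatched row col ci).foldl altApply (0, [], 0, 0, 0, 0) := by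
  unfold altStep pvMatched
  rw [PySem.List.foldl_if_eq_foldl_filter (fun p => p.2 == ci) (fun st p => altApply st p.1) (row.zip col) (0, [], 0, 0, 0, 0), List.foldl_map]

-- A's index loop builds exactly the matched-cells list
theorem loopA_eq_matched (row : List (List Int)) (col : List Int) (ci : Int)
    (h : row.length = col.length) :
    (PySem.List.pyRange 0 (col.length : Int) 1).foldl
      (fun acc i => if PySem.List.pyGetD col i 0 == ci
        then acc ++ [PySem.List.pyGetD row i []] else acc) [] = pvMatched row col ci := by
  have hz : (row.zip col).length = col.length := by
    rw [List.length_zip, h, min_self]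
  rw [← hz]
  have hc : (PySem.List.pyRange 0 ((row.zip col).length : Int) 1).foldl
      (fun acc i => if PySem.List.pyGetD col i 0 == ci
        then acc ++ [PySem.List.pyGetD row i []] else acc) [] =
    (PySem.List.pyRange 0 ((row.zip col).length : Int) 1).foldl
      (fun acc j => (fun (acc : List (List Int)) (p : List Int × Int) =>
         if p.2 == ci then acc ++ [p.1] else acc) acc (PySem.List.pyGetD (row.zip col) j ([], 0))) [] := by
    apply PySem.List.foldl_congr_mem
    intro acc x hx
    rw [PySem.List.mem_pyRange_one] at hx
    rw [hz] at hx
    have hxr : x < (row.length : Int) := by omega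
    have hxz : x < ((row.zip col).length : Int) := by omega
    rw [PySem.List.pyGetD_eq_getElem col 0 hx.1 hx.2,
        PySem.List.pyGetD_eq_getElem row [] hx.1 hxr,
        PySem.List.pyGetD_eq_getElem (row.zip col) ([], 0) hx.1 hxz]
    simp [List.getElem_zip]
  rw [hc, PySem.List.foldl_pyRange_zero_pyGetD' (row.zip col) ([], 0)
        (fun (acc : List (List Int)) (p : List Int × Int) => if p.2 == ci then acc ++ [p.1] else acc) [],
      PySem.List.foldl_append_if (fun (p : List Int × Int) => p.2 == ci) Prod.fst]
  simp [pvMatched]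

-- A's merge of ≥ 2 cells, written as the running min/max folds B maintains
theorem merged_eq (m : List (List Int)) :
    ∀ (c d : List Int) (rest : List (List Int)), m = c :: d :: rest →
    get_merged_cell m =
      [rest.foldl (fun a x => min a (PySem.List.pyGetD x 0 0)) (min (PySem.List.pyGetD c 0 0) (PySem.List.pyGetD d 0 0)),
       rest.foldl (fun a x => min a (PySem.List.pyGetD x 1 0)) (min (PySem.List.pyGetD c 1 0) (PySem.List.pyGetD d 1 0)),
       rest.foldl (fun a x => max a (PySem.List.pyGetD x 2 0)) (max (PySem.List.pyGetD c 2 0) (PySem.List.pyGetD d 2 0)),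
       rest.foldl (fun a x => max a (PySem.List.pyGetD x 3 0)) (max (PySem.List.pyGetD c 3 0) (PySem.List.pyGetD d 3 0))] := by
  intro c d rest hm
  subst hm
  simp only [get_merged_cell, List.length_cons]
  rw [if_neg (by omega)]
  simp only [List.map_cons, PySem.List.min?_id_cons, PySem.List.max?_id_cons,
    List.foldl_cons, List.foldl_map, Option.getD_some]

theorem get_final_cell_main (tablecellrows : List (List (List Int))) (skeleton : List (List Int)) (rowindex : Int) (colindex : Int)
    (hlen : (PySem.List.pyGetD tablecellrows rowindex []).length = (PySem.List.pyGetD skeleton rowindex []).length) :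
    get_final_cell tablecellrows skeleton rowindex colindex = get_final_cell_alt tablecellrows skeleton rowindex colindex := by
  simp only [get_final_cell, get_final_cell_alt]
  rw [loopA_eq_matched _ _ _ hlen, foldB_eq_foldl_matched]
  generalize pvMatched (PySem.List.pyGetD tablecellrows rowindex []) (PySem.List.pyGetD skeleton rowindex []) colindex = m
  match m with
  | [] => simp
  | [c] => simp [get_merged_cell, altApply, PySem.List.pyGetD_zero_cons]
  | c :: d :: rest =>
    rw [merged_eq _ c d rest rfl]
    rw [if_neg (by simp)]
    simp only [List.foldl_cons]
    have s1 : altApply (0, [], 0, 0, 0, 0) c = (1, c, 0, 0, 0, 0) := by simp [altApply]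
    have s2 : altApply (1, c, 0, 0, 0, 0) d =
        (2, c, min (PySem.List.pyGetD c 0 0) (PySem.List.pyGetD d 0 0),
         min (PySem.List.pyGetD c 1 0) (PySem.List.pyGetD d 1 0),
         max (PySem.List.pyGetD c 2 0) (PySem.List.pyGetD d 2 0),
         max (PySem.List.pyGetD c 3 0) (PySem.List.pyGetD d 3 0)) := by
      simp [altApply]
    rw [s1, s2, foldl_altApply_ge_two rest 2 _ _ _ _ c (by omega)]
    rw [if_neg (by simp; omega), if_neg (by simp; omega)]

-- ===== VERDICT (by name: the statement is the Claim_ definition above) =====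
theorem get_final_cell_spec : Claim_equal_get_final_cell := by
  intro tablecellrows skeleton rowindex colindex _hDom hPre
  unfold Spec_get_final_cell
  exact get_final_cell_main tablecellrows skeleton rowindex colindex hPre.2.2.1
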